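-- pv_equiv track=rewrite | github.com/Faheem107/Puncta-Tracking | Puncta-Tracking/puncta_tracking/io.py | rearrange_axes
-- ===== SOURCE A (Python) =====
-- def rearrange_axes(
--     input_axes_order: str, master_axes_order: str
-- ) -> tuple[str, list[int]]:
--     """
--     Rearranges given input axes order, assumed to be a subset of master axes order,
--     such that the axes follow the same order as that given in the master axes order.
--     For example, if input axes order is CTYX and master axes order is TZCYX, then the
--     axes order is rearranged to TCYX.
--
--     Raises a ValueError if the input_axes_order is not a subset of master_axes_order.
--
--     Returns the rearranged axes order, and the list of indices which rearrange
--     input_axes_order into the rearranged axes order. For the above example, the full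
--     output is then 'TCYX',[1,0,2,3] . Note that 'CTYX'[1] = 'T', 'CTYX'[0] = 'C',
--     'CTYX'[2] = 'Y' and 'CTYX'[3] = 'X'.
--     """
--     # Check subset
--     input_set = set(input_axes_order)
--     if input_set.intersection(master_axes_order) != input_set:
--         raise ValueError(
--             f"Input axes order {input_axes_order} is not a subset of {master_axes_order}"
--         )
--     # Sort input based on master
--     input_dict = {ax: ind for ind, ax in enumerate(input_axes_order)}
--     output_axes_order = "".join(sorted(input_dict, key=master_axes_order.index))
--     sort_indices = [input_dict[ax] for ax in output_axes_order]
--     return output_axes_order, sort_indices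
-- ===== SOURCE B (Python) =====
-- def rearrange_axes(
--     input_axes_order: str, master_axes_order: str
-- ) -> tuple[str, list[int]]:
--     """Same result as A, but the rearranged order is produced by one linear scan
--     over master_axes_order (first occurrences kept, restricted to the input axes)
--     instead of sorting the input axes by master_axes_order.index."""
--     input_set = set(input_axes_order)
--     if not input_set.issubset(master_axes_order):
--         raise ValueError(
--             f"Input axes order {input_axes_order} is not a subset of {master_axes_order}"
--         )
--     input_dict = dict(zip(input_axes_order, range(len(input_axes_order))))
--     pairs = [
--         (ax, input_dict[ax])
--         for ax in dict.fromkeys(master_axes_order)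
--         if ax in input_dict
--     ]
--     return "".join(ax for ax, _ in pairs), [ind for _, ind in pairs]
-- ===== Notes on version B (the rewrite author's own statement) =====
-- stated objective: alternative
-- what changed: B replaces A's sort of the input axes by master_axes_order.index with a single first-occurrence scan over master_axes_order (dict.fromkeys) filtered to the input axes, emitting axis and index in one pass.
import Mathlib
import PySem

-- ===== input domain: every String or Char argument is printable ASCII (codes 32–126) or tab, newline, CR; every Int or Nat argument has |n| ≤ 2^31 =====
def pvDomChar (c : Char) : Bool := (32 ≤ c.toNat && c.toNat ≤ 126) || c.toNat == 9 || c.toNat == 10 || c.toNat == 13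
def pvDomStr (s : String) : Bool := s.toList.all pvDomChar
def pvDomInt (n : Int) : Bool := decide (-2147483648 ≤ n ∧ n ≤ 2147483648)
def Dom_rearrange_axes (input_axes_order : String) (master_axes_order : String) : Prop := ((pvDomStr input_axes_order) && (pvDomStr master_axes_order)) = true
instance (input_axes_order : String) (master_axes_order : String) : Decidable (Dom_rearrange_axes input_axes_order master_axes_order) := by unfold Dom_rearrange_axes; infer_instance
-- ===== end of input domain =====

-- B replaces A's sort of the input axes by master.index with a single first-occurrence
-- scan over master_axes_order restricted to the input axes (objective: alternative).

-- ===== PORT A =====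
-- A's dict comprehension {ax: ind for ind, ax in enumerate(input_axes_order)}
def pyInputDictA (L : List Char) : PySem.Dict Char Int :=
  (PySem.List.enumerate L).foldl (fun d p => d.insert p.2 p.1) PySem.Dict.empty

def rearrange_axes (input_axes_order : String) (master_axes_order : String) : String × List Int :=
  let input_set := PySem.Set.ofList input_axes_order.toList
  if PySem.Set.equal (PySem.Set.inter input_set master_axes_order.toList) input_set = false then
    ("", [])  -- Python raises ValueError here; these inputs are excluded by Pre_
  else
    let input_dict := pyInputDictA input_axes_order.toList
    -- master_axes_order.index(ax): str.index never raises under the subset guard and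
    -- then agrees with PySem.Chars.find (exact there)
    let output_axes_order :=
      PySem.List.sorted input_dict.keys (fun ax => PySem.Chars.find master_axes_order.toList [ax])
    -- input_dict[ax]: the key is always present here, so getD is exact
    (String.ofList output_axes_order, output_axes_order.map (fun ax => input_dict.getD ax 0))

-- ===== PORT B =====
def rearrange_axes_alt (input_axes_order : String) (master_axes_order : String) : String × List Int :=
  let input_set := PySem.Set.ofList input_axes_order.toList
  if PySem.Set.issubset input_set (PySem.Set.ofList master_axes_order.toList) = false then
    ("", [])  -- Python raises ValueError here; these inputs are excluded by Pre_
  else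
    -- dict(zip(input_axes_order, range(len(input_axes_order))))
    let input_dict := PySem.Dict.ofList
      (input_axes_order.toList.zip (PySem.List.pyRange 0 (PySem.Str.len input_axes_order)))
    -- [(ax, input_dict[ax]) for ax in dict.fromkeys(master_axes_order) if ax in input_dict]
    -- input_dict[ax] is guarded by the membership test, so getD is exact
    let pairs := (PySem.List.dedup master_axes_order.toList).filterMap
      (fun ax => if input_dict.contains ax then some (ax, input_dict.getD ax 0) else none)
    (String.ofList (pairs.map (·.1)), pairs.map (·.2))

-- ===== PRECONDITION & SPEC =====
-- Pre_ excludes exactly the inputs on which A raises ValueError: some input axis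
-- does not occur in master_axes_order.
def Pre_rearrange_axes (input_axes_order : String) (master_axes_order : String) : Prop :=
  (input_axes_order.toList.all (fun c => master_axes_order.toList.contains c)) = true
instance (input_axes_order : String) (master_axes_order : String) : Decidable (Pre_rearrange_axes input_axes_order master_axes_order) := by unfold Pre_rearrange_axes; infer_instance

def pvWitness_rearrange_axes : String × String := ("CTYX", "TZCYX")

def Spec_rearrange_axes (input_axes_order : String) (master_axes_order : String) (out : String × List Int) : Prop := out = rearrange_axes_alt input_axes_order master_axes_order
instance (input_axes_order : String) (master_axes_order : String) (out : String × List Int) : Decidable (Spec_rearrange_axes input_axes_order master_axes_order out) := by unfold Spec_rearrange_axes; infer_instance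

-- ===== CLAIM (what is proved, stated in full; the proofs are below) =====
def Claim_equal_rearrange_axes : Prop := ∀ (input_axes_order : String) (master_axes_order : String), Dom_rearrange_axes input_axes_order master_axes_order → Pre_rearrange_axes input_axes_order master_axes_order → Spec_rearrange_axes input_axes_order master_axes_order (rearrange_axes input_axes_order master_axes_order)

-- ===== LEMMAS AND PROOFS =====

theorem keys_insert_eq_add (d : PySem.Dict Char Int) (k : Char) (v : Int) :
    (d.insert k v).keys = PySem.Set.add d.keys k := by
  have hc : PySem.Set.contains d.keys k = d.contains k := by
    simp only [PySem.Set.contains, PySem.Dict.contains, PySem.Dict.keys]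
    rw [Bool.eq_iff_iff]
    simp [List.any_eq_true, List.mem_map, beq_iff_eq]
  by_cases h : d.contains k = true
  · rw [PySem.Set.add, hc, h]
    simp only [PySem.Dict.insert, h, if_pos, PySem.Dict.keys, List.map_map]
    apply List.map_congr_left
    intro p _
    by_cases hp : p.1 = k
    · simp [hp]
    · simp [hp]
  · rw [PySem.Set.add, hc, if_neg h]
    simp [PySem.Dict.insert, h, PySem.Dict.keys]

theorem dict_enum_zip (L : List Char) : ∀ (s : Int) (d : PySem.Dict Char Int),
    (PySem.List.enumerate L s).foldl (fun d p => d.insert p.2 p.1) d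
      = (L.zip (PySem.List.pyRange s (s + L.length))).foldl (fun acc p => acc.insert p.1 p.2) d := by
  induction L with
  | nil => intro s d; simp [PySem.List.enumerate, PySem.List.pyRange]
  | cons x t ih =>
    intro s d
    have hr : PySem.List.pyRange s (s + (x :: t).length)
        = s :: PySem.List.pyRange (s + 1) (s + (x :: t).length) := by
      apply PySem.List.pyRange_one_cons
      have : (0:Int) < ((x :: t).length : Int) := by exact_mod_cast Nat.succ_pos t.length
      omega
    rw [hr, PySem.List.enumerate]
    simp only [List.zip_cons_cons, List.foldl_cons]
    have he : s + ((x :: t).length : Int) = (s + 1) + t.length := by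
      simp only [List.length_cons]; push_cast; ring
    rw [he]
    exact ih (s + 1) (d.insert x s)

theorem keys_fold (L : List Char) : ∀ (s : Int) (d : PySem.Dict Char Int),
    ((PySem.List.enumerate L s).foldl (fun d p => d.insert p.2 p.1) d).keys
      = L.foldl PySem.Set.add d.keys := by
  induction L with
  | nil => intro s d; simp [PySem.List.enumerate]
  | cons x t ih =>
    intro s d
    rw [PySem.List.enumerate]
    simp only [List.foldl_cons]
    rw [ih (s + 1) (d.insert x s), keys_insert_eq_add]

theorem keys_pyInputDictA (L : List Char) :
    (pyInputDictA L).keys = PySem.List.dedup L := by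
  rw [pyInputDictA, keys_fold]
  rfl

theorem filterMap_ite {α β : Type} (p : α → Bool) (f : α → β) (l : List α) :
    l.filterMap (fun a => if p a then some (f a) else none) = (l.filter p).map f := by
  induction l with
  | nil => rfl
  | cons x t ih =>
    by_cases h : p x = true <;> simp [List.filter_cons, h, ih]

theorem foldl_add_eq : ∀ (n : Nat) (xs : List Char), xs.length ≤ n → ∀ (s : List Char),
    xs.foldl PySem.Set.add s = s ++ PySem.Set.ofList (xs.filter (fun c => !s.contains c)) := by
  intro n
  induction n with
  | zero =>
    intro xs h s
    have : xs = [] := List.eq_nil_of_length_eq_zero (Nat.le_zero.mp h)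
    subst this
    simp [PySem.Set.ofList, PySem.Set.empty]
  | succ n ih =>
    intro xs h s
    match xs with
    | [] => simp [PySem.Set.ofList, PySem.Set.empty]
    | x :: t =>
      have ht : t.length ≤ n := by simpa using h
      by_cases hx : List.contains s x = true
      all_goals have hmem := List.contains_iff_mem (as := s) (a := x)
      · have ha : PySem.Set.add s x = s := by simp [PySem.Set.add, PySem.Set.contains, hmem.mp hx]
        have hf : (x :: t).filter (fun c => !s.contains c) = t.filter (fun c => !s.contains c) := by
          simp [List.filter_cons, hmem.mp hx]
        rw [List.foldl_cons, ha, hf]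
        exact ih t ht s
      · have hnm : ¬ x ∈ s := fun hm => hx (hmem.mpr hm)
        have ha : PySem.Set.add s x = s ++ [x] := by simp [PySem.Set.add, PySem.Set.contains, hnm]
        have hf : (x :: t).filter (fun c => !s.contains c) = x :: t.filter (fun c => !s.contains c) := by
          simp [List.filter_cons, hnm]
        rw [List.foldl_cons, ha, hf, ih t ht (s ++ [x])]
        have h2 : PySem.Set.ofList (x :: t.filter (fun c => !s.contains c))
            = [x] ++ PySem.Set.ofList ((t.filter (fun c => !s.contains c)).filter
                (fun c => !([x] : List Char).contains c)) := by
          rw [PySem.Set.ofList, List.foldl_cons]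
          have hax : PySem.Set.add PySem.Set.empty x = [x] := rfl
          rw [hax]
          exact ih _ (le_trans (List.length_filter_le _ _) ht) [x]
        rw [h2, List.filter_filter, List.append_assoc]
        congr 2
        apply congrArg PySem.Set.ofList
        apply List.filter_congr
        intro a _
        by_cases hax : a = x <;> by_cases has : List.contains s a = true <;>
          simp_all [hax, List.contains_append]

theorem dedup_cons (x : Char) (M : List Char) :
    PySem.List.dedup (x :: M) = x :: PySem.List.dedup (M.filter (fun c => c != x)) := by
  show PySem.Set.ofList (x :: M) = _
  rw [PySem.Set.ofList, List.foldl_cons]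
  have hax : PySem.Set.add PySem.Set.empty x = [x] := rfl
  rw [hax, foldl_add_eq M.length M le_rfl [x]]
  show _ = x :: PySem.Set.ofList (M.filter fun c => c != x)
  simp only [List.cons_append, List.nil_append]
  congr 1
  apply congrArg PySem.Set.ofList
  apply List.filter_congr
  intro a _
  by_cases hax : a = x <;> simp [hax]

theorem idxOf_filter_lt (q : Char → Bool) : ∀ (M : List Char) (a b : Char),
    a ∈ M.filter q → b ∈ M.filter q →
    List.idxOf a (M.filter q) < List.idxOf b (M.filter q) → List.idxOf a M < List.idxOf b M := by
  intro M
  induction M with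
  | nil => intro a b ha; simp at ha
  | cons y T ih =>
    intro a b ha hb hlt
    have hqa : q a = true := (List.mem_filter.mp ha).2
    have hqb : q b = true := (List.mem_filter.mp hb).2
    by_cases hy : q y = true
    · rw [List.filter_cons_of_pos hy] at ha hb hlt
      by_cases hay : a = y
      · subst hay
        by_cases hby : b = a
        · subst hby; omega
        · rw [List.idxOf_cons_self]
          rw [List.idxOf_cons_ne _ (fun h => hby h.symm)]
          omega
      · rw [List.idxOf_cons_ne _ (fun h => hay h.symm)] at hlt
        by_cases hby : b = y
        · subst hby; rw [List.idxOf_cons_self] at hlt; omega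
        · rw [List.idxOf_cons_ne _ (fun h => hby h.symm)] at hlt
          rw [List.idxOf_cons_ne _ (fun h => hay h.symm), List.idxOf_cons_ne _ (fun h => hby h.symm)]
          have ha' : a ∈ T.filter q := (List.mem_cons.mp ha).resolve_left hay
          have hb' : b ∈ T.filter q := (List.mem_cons.mp hb).resolve_left hby
          have := ih a b ha' hb' (by omega)
          omega
    · rw [List.filter_cons_of_neg (by simpa using hy)] at ha hb hlt
      have hay : a ≠ y := fun h => hy (h ▸ hqa)
      have hby : b ≠ y := fun h => hy (h ▸ hqb)
      rw [List.idxOf_cons_ne _ (fun h => hay h.symm), List.idxOf_cons_ne _ (fun h => hby h.symm)]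
      have := ih a b ha hb hlt
      omega

theorem pairwise_idxOf_dedup : ∀ (n : Nat) (M : List Char), M.length ≤ n →
    (PySem.List.dedup M).Pairwise (fun a b => List.idxOf a M < List.idxOf b M) := by
  intro n
  induction n with
  | zero =>
    intro M h
    have : M = [] := List.eq_nil_of_length_eq_zero (Nat.le_zero.mp h)
    subst this
    simp [PySem.List.dedup, PySem.Set.ofList, PySem.Set.empty]
  | succ n ih =>
    intro M h
    match M with
    | [] => simp [PySem.List.dedup, PySem.Set.ofList, PySem.Set.empty]
    | x :: T =>
      have ht : T.length ≤ n := by simpa using h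
      rw [dedup_cons]
      constructor
      · intro b hb
        have hbf : b ∈ T.filter (fun c => c != x) := by
          rw [PySem.List.dedup] at hb; exact (PySem.Set.mem_ofList _ _).mp hb
        have hbx : b ≠ x := by simpa using (List.mem_filter.mp hbf).2
        rw [List.idxOf_cons_self, List.idxOf_cons_ne _ (fun h' => hbx h'.symm)]
        omega
      · have hp := ih (T.filter (fun c => c != x)) (le_trans (List.length_filter_le _ _) ht)
        apply hp.imp_of_mem
        intro a b hma hmb hlt
        have haf : a ∈ T.filter (fun c => c != x) := (PySem.Set.mem_ofList _ _).mp hma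
        have hbf : b ∈ T.filter (fun c => c != x) := (PySem.Set.mem_ofList _ _).mp hmb
        have hax : a ≠ x := by simpa using (List.mem_filter.mp haf).2
        have hbx : b ≠ x := by simpa using (List.mem_filter.mp hbf).2
        have := idxOf_filter_lt _ T a b haf hbf hlt
        rw [List.idxOf_cons_ne _ (fun h' => hax h'.symm), List.idxOf_cons_ne _ (fun h' => hbx h'.symm)]
        omega

theorem idxOf_min : ∀ (M : List Char) (c : Char) (j : Nat), j < List.idxOf c M → M[j]? ≠ some c := by
  intro M
  induction M with
  | nil => intro c j h; simp
  | cons y T ih =>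
    intro c j h
    by_cases hy : y = c
    · subst hy; rw [List.idxOf_cons_self] at h; omega
    · rw [List.idxOf_cons_ne _ hy] at h
      match j with
      | 0 => simpa using hy
      | j + 1 =>
        simpa using ih c j (by omega)

theorem singleton_prefix_head (c : Char) (l : List Char) : [c] <+: l ↔ l.head? = some c := by
  constructor
  · rintro ⟨t, rfl⟩; rfl
  · intro h
    match l, h with
    | c' :: t, h => exact ⟨t, by simpa using (by simpa using h : c' = c) ▸ rfl⟩

theorem find_single (M : List Char) (c : Char) (hc : c ∈ M) :
    PySem.Chars.find M [c] = (List.idxOf c M : Int) := by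
  have hinf : [c] <:+: M := by
    obtain ⟨s, t, rfl⟩ := List.append_of_mem hc
    exact ⟨s, t, by simp⟩
  have hne : PySem.Chars.find M [c] ≠ -1 := by
    rw [ne_eq, PySem.Chars.find_eq_neg_one_iff]; exact fun h => h hinf
  have hspec := PySem.Chars.findFrom_natCast_spec M [c] 0 (Nat.zero_le _)
    (by rw [Nat.cast_zero, PySem.Chars.findFrom_zero]; exact hne)
  rw [Nat.cast_zero, PySem.Chars.findFrom_zero] at hspec
  obtain ⟨h0, hpre, hmin⟩ := hspec
  set f := PySem.Chars.find M [c] with hf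
  have hlt : List.idxOf c M < M.length := List.idxOf_lt_length_iff.mpr hc
  have hMi : M[List.idxOf c M] = c := List.getElem_idxOf hlt
  have hle1 : f.toNat ≤ List.idxOf c M := by
    by_contra hcon
    apply hmin (List.idxOf c M) (Nat.zero_le _) (by omega)
    rw [singleton_prefix_head, List.head?_drop, List.getElem?_eq_getElem hlt, hMi]
  have hle2 : List.idxOf c M ≤ f.toNat := by
    rw [singleton_prefix_head, List.head?_drop] at hpre
    by_contra hcon
    exact idxOf_min M c f.toNat (by omega) hpre
  omega

theorem sorted_keys (L M : List Char) (pre : ∀ c ∈ L, c ∈ M) (p : Char → Bool)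
    (hp : ∀ c, p c = true ↔ c ∈ L) :
    PySem.List.sorted (PySem.List.dedup L) (fun ax => PySem.Chars.find M [ax])
      = (PySem.List.dedup M).filter p := by
  apply PySem.List.sorted_eq_of_perm_of_pairwise_lt
  · rw [List.perm_ext_iff_of_nodup ((PySem.List.nodup_dedup M).filter p) (PySem.List.nodup_dedup L)]
    intro a
    rw [List.mem_filter, PySem.List.mem_dedup, PySem.List.mem_dedup, hp]
    exact ⟨fun h => h.2, fun h => ⟨pre a h, h⟩⟩
  · have hq := (pairwise_idxOf_dedup M.length M le_rfl).filter p
    apply hq.imp_of_mem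
    intro a b hma hmb hlt
    have ha : a ∈ M := (PySem.List.mem_dedup M a).mp (List.mem_of_mem_filter hma)
    have hb : b ∈ M := (PySem.List.mem_dedup M b).mp (List.mem_of_mem_filter hmb)
    rw [find_single M a ha, find_single M b hb]
    exact_mod_cast hlt

theorem main (i m : String) (hP : ∀ c ∈ i.toList, c ∈ m.toList) :
    rearrange_axes i m = rearrange_axes_alt i m := by
  have hga : PySem.Set.equal (PySem.Set.inter (PySem.Set.ofList i.toList) m.toList)
      (PySem.Set.ofList i.toList) = true := by
    rw [PySem.Set.equal_iff]
    intro x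
    rw [PySem.Set.inter]
    rw [List.mem_filter]
    constructor
    · exact fun h => h.1
    · intro h
      refine ⟨h, ?_⟩
      have := hP x ((PySem.Set.mem_ofList _ _).mp h)
      exact List.contains_iff_mem.mpr this
  have hgb : PySem.Set.issubset (PySem.Set.ofList i.toList)
      (PySem.Set.ofList m.toList) = true := by
    rw [PySem.Set.issubset_iff]
    intro x hx
    exact (PySem.Set.mem_ofList _ _).mpr (hP x ((PySem.Set.mem_ofList _ _).mp hx))
  have hdict : PySem.Dict.ofList
      (i.toList.zip (PySem.List.pyRange 0 (PySem.Str.len i))) = pyInputDictA i.toList := by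
    rw [PySem.Str.len_eq, pyInputDictA, PySem.Dict.ofList, PySem.Dict.update,
      dict_enum_zip i.toList 0 PySem.Dict.empty, zero_add]
  rw [rearrange_axes, rearrange_axes_alt]
  simp only [hga, hgb, Bool.true_eq_false, reduceIte, hdict]
  set D := pyInputDictA i.toList with hD
  have hp : ∀ c, D.contains c = true ↔ c ∈ i.toList := by
    intro c
    rw [PySem.Dict.contains_eq_decide_mem_keys, keys_pyInputDictA, decide_eq_true_eq,
      PySem.List.mem_dedup]
  rw [filterMap_ite (fun ax => D.contains ax) (fun ax => (ax, D.getD ax 0))]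
  rw [hD, keys_pyInputDictA, sorted_keys i.toList m.toList hP
    (fun ax => (pyInputDictA i.toList).contains ax) hp]
  simp [List.map_map, Function.comp_def]

-- ===== VERDICT (by name: the statement is the Claim_ definition above) =====
theorem rearrange_axes_spec : Claim_equal_rearrange_axes := by
  intro input_axes_order master_axes_order _hDom hPre
  unfold Spec_rearrange_axes
  apply main
  intro c hc
  exact List.contains_iff_mem.mp (List.all_eq_true.mp hPre c hc)
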